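-- pv_equiv track=rewrite | github.com/jangidnitin28/NumPy-And-Pandas-Basic | BasicProject/anime.py | extract_episodes
-- ===== SOURCE A (Python) =====
-- def extract_episodes(txt):
--     check = False
--     data = ""
--
--     for i in txt:
--         if check and i == ")":
--             break
--         if check:
--             data += i
--         if i == "(":
--             check = True
--     return data
-- ===== SOURCE B (Python) =====
-- def extract_episodes(txt):
--     i = txt.find('(')
--     if i == -1:
--         return ''
--     j = txt.find(')', i + 1)
--     if j == -1:
--         return txt[i + 1:]
--     return txt[i + 1:j]
-- ===== Notes on version B (the rewrite author's own statement) =====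
-- stated objective: simpler
-- what changed: Replaces the per-character flag-and-accumulate loop with two index searches (str.find) and a single slice, returning the tail when no closing paren follows.
import Mathlib
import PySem

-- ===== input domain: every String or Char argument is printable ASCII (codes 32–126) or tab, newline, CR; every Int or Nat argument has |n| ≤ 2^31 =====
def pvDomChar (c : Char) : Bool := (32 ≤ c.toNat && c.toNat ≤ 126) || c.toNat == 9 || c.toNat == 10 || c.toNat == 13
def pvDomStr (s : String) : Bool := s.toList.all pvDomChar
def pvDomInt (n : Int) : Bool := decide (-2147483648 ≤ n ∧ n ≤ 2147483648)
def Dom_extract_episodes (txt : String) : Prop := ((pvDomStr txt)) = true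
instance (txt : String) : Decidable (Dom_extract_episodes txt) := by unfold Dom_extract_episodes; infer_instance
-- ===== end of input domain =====

-- B replaces A's per-character flag-and-accumulate loop by two index searches (find) and one slice; same values everywhere.

-- ===== PORT A =====
-- the for-loop with break, state (check, data); data is the accumulated string as its code points
def pvLoopA : List Char → Bool → List Char → List Char
  | [], _, data => data
  | c :: rest, check, data =>
    if check ∧ c = ')' then data
    else pvLoopA rest (if c = '(' then true else check) (if check then data ++ [c] else data)

def extract_episodes (txt : String) : String := String.ofList (pvLoopA txt.toList false [])

-- ===== PORT B =====
def extract_episodes_alt (txt : String) : String :=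
  let i := PySem.Str.find txt "("
  if i = -1 then "" else
    let j := PySem.Str.findFrom txt ")" (i + 1) none
    if j = -1 then PySem.Str.slice txt (some (i + 1)) none
    else PySem.Str.slice txt (some (i + 1)) (some j)

-- ===== PRECONDITION & SPEC =====
def Spec_extract_episodes (txt : String) (out : String) : Prop := out = extract_episodes_alt txt
instance (txt : String) (out : String) : Decidable (Spec_extract_episodes txt out) := by unfold Spec_extract_episodes; infer_instance

-- ===== CLAIM (what is proved, stated in full; the proofs are below) =====
def Claim_equal_extract_episodes : Prop := ∀ (txt : String), Dom_extract_episodes txt → Spec_extract_episodes txt (extract_episodes txt)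

-- ===== LEMMAS AND PROOFS =====

lemma pv_single_prefix {c : Char} {l : List Char} : [c] <+: l ↔ l.head? = some c := by
  cases l with
  | nil => simp
  | cons a t => simp [List.cons_prefix_iff]

lemma pv_loopA_no_open {cs : List Char} (h : '(' ∉ cs) (data : List Char) :
    pvLoopA cs false data = data := by
  induction cs with
  | nil => rfl
  | cons c rest ih =>
    simp only [List.mem_cons, not_or] at h
    simp [pvLoopA, Ne.symm h.1, ih h.2]

lemma pv_loopA_open {pre : List Char} (h : '(' ∉ pre) (rest data : List Char) :
    pvLoopA (pre ++ '(' :: rest) false data = pvLoopA rest true data := by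
  induction pre with
  | nil => simp [pvLoopA]
  | cons c pre' ih =>
    simp only [List.mem_cons, not_or] at h
    simp [pvLoopA, Ne.symm h.1, ih h.2]

lemma pv_loopA_no_close {rest : List Char} (h : ')' ∉ rest) (data : List Char) :
    pvLoopA rest true data = data ++ rest := by
  induction rest generalizing data with
  | nil => simp [pvLoopA]
  | cons c r ih =>
    simp only [List.mem_cons, not_or] at h
    simp [pvLoopA, Ne.symm h.1, ih h.2]

lemma pv_loopA_close {pre : List Char} (h : ')' ∉ pre) (rest data : List Char) :
    pvLoopA (pre ++ ')' :: rest) true data = data ++ pre := by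
  induction pre generalizing data with
  | nil => simp [pvLoopA]
  | cons c pre' ih =>
    simp only [List.mem_cons, not_or] at h
    simp [pvLoopA, Ne.symm h.1, ih h.2]

-- if find = some nonneg i, the char sits at i.toNat and nowhere earlier
lemma pv_find_single_spec (cs : List Char) (c : Char)
    (h : PySem.Chars.find cs [c] ≠ -1) :
    (cs.drop (PySem.Chars.find cs [c]).toNat).head? = some c ∧
      c ∉ cs.take (PySem.Chars.find cs [c]).toNat := by
  have h0 : 0 ≤ PySem.Chars.find cs [c] := by
    have := PySem.Chars.neg_one_le_find cs [c]
    omega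
  obtain ⟨h1, h2⟩ := PySem.Chars.find_spec (s := cs) (sub := [c]) h0
  refine ⟨pv_single_prefix.mp h1, ?_⟩
  intro hmem
  obtain ⟨m, hm, he⟩ := List.getElem_of_mem hmem
  have hmlt : m < (PySem.Chars.find cs [c]).toNat := by
    have := cs.length_take_le (PySem.Chars.find cs [c]).toNat
    omega
  refine h2 m hmlt (pv_single_prefix.mpr ?_)
  have hm' : m < cs.length := lt_of_lt_of_le hm (by simp)
  rw [List.head?_drop]
  rw [List.getElem?_eq_getElem hm']
  have : cs[m] = c := by
    have := List.getElem_take (xs := cs) (i := m) (h := hm)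
    simpa [this] using he
  simp [this]

lemma pv_string_eq_of_toList {s t : String} (h : s.toList = t.toList) : s = t := by
  have := congrArg String.ofList h
  simpa using this

-- ===== VERDICT (by name: the statement is the Claim_ definition above) =====
theorem extract_episodes_spec : Claim_equal_extract_episodes := by
  intro txt _
  unfold Spec_extract_episodes extract_episodes extract_episodes_alt
  set cs := txt.toList with hcs
  simp only [PySem.Str.find_eq, PySem.Str.findFrom_eq]
  rw [show "(".toList = ['('] from rfl] ; rw [show ")".toList = [')'] from rfl]
  by_cases hi : PySem.Chars.find cs ['('] = -1
  · -- no '(' anywhere: both return ""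
    rw [if_pos hi]
    have hnot : '(' ∉ cs := by
      have := (PySem.Chars.find_eq_neg_one_iff (s := cs) (sub := ['('])).mp hi
      intro hm
      exact this ((List.singleton_infix_iff _ _).mpr hm)
    rw [pv_loopA_no_open hnot]
  · -- found an opening paren at i
    set i := PySem.Chars.find cs ['('] with hidef
    obtain ⟨hhead, hnotake⟩ := pv_find_single_spec cs '(' hi
    have h0 : 0 ≤ i := by have := PySem.Chars.neg_one_le_find cs ['(']; omega
    have hlt : i.toNat < cs.length := by
      by_contra hge
      rw [List.drop_eq_nil_of_le (by omega)] at hhead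
      simp at hhead
    set k : ℕ := i.toNat + 1 with hk
    have hkle : k ≤ cs.length := by omega
    have hdrop : cs.drop i.toNat = '(' :: cs.drop k := by
      cases hd : cs.drop i.toNat with
      | nil => rw [hd] at hhead; simp at hhead
      | cons a t =>
        rw [hd] at hhead
        simp at hhead
        have : t = cs.drop k := by
          have := congrArg List.tail hd
          simpa [hk, List.tail_drop] using this.symm
        rw [hhead, this]
    have hsplit : cs = cs.take i.toNat ++ '(' :: cs.drop k := by
      conv_lhs => rw [← cs.take_append_drop i.toNat]
      rw [hdrop]
    have hcast : i + 1 = ((k : ℕ) : ℤ) := by omega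
    rw [if_neg hi, hcast, PySem.Chars.findFrom_natCast cs [')'] k hkle]
    set rest := cs.drop k with hrest
    by_cases hj : PySem.Chars.find rest [')'] = -1
    · -- no ')' after the '(': A collects the whole tail, B slices to the end
      rw [if_pos (by simp [hj])]
      have hnoc : ')' ∉ rest := by
        have := (PySem.Chars.find_eq_neg_one_iff (s := rest) (sub := [')'])).mp hj
        intro hm
        exact this ((List.singleton_infix_iff _ _).mpr hm)
      apply pv_string_eq_of_toList
      rw [PySem.Str.toList_slice]
      simp only [PySem.Chars.slice_eq_listSlice]
      rw [PySem.List.slice_from_natCast]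
      conv_lhs => rw [hsplit]
      rw [pv_loopA_open hnotake, pv_loopA_no_close hnoc]
      simp only [List.nil_append, String.toList_ofList]
      exact hrest
    · -- closing paren found at k + j' : A stops there, B slices up to it
      set j' := PySem.Chars.find rest [')'] with hj'def
      have hj0 : 0 ≤ j' := by have := PySem.Chars.neg_one_le_find rest [')']; omega
      have hne : ¬ ((k : ℤ) + j' = -1) := by omega
      rw [if_neg (show ¬ ((if PySem.Chars.find rest [')'] = -1 then (-1:ℤ) else ↑k + PySem.Chars.find rest [')']) = -1) from by rw [if_neg hj]; exact hne)]
      obtain ⟨hhead2, hnotake2⟩ := pv_find_single_spec rest ')' hj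
      have hlt2 : j'.toNat < rest.length := by
        by_contra hge
        rw [List.drop_eq_nil_of_le (by omega)] at hhead2
        simp at hhead2
      have hdrop2 : rest.drop j'.toNat = ')' :: rest.drop (j'.toNat + 1) := by
        cases hd : rest.drop j'.toNat with
        | nil => rw [hd] at hhead2; simp at hhead2
        | cons a t =>
          rw [hd] at hhead2
          simp at hhead2
          have : t = rest.drop (j'.toNat + 1) := by
            have := congrArg List.tail hd
            simpa [List.tail_drop] using this.symm
          rw [hhead2, this]
      have hsplit2 : rest = rest.take j'.toNat ++ ')' :: rest.drop (j'.toNat + 1) := by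
        conv_lhs => rw [← rest.take_append_drop j'.toNat]
        rw [hdrop2]
      apply pv_string_eq_of_toList
      rw [PySem.Str.toList_slice]
      have hcast2 : (k : ℤ) + j' = ((k : ℕ) : ℤ) + ((j'.toNat : ℕ) : ℤ) := by omega
      rw [if_neg hj, hcast2]
      simp only [PySem.Chars.slice_eq_listSlice]
      rw [PySem.List.slice_natCast_add]
      conv_lhs => rw [hsplit]
      rw [pv_loopA_open hnotake]
      conv_lhs => rw [hsplit2]
      rw [pv_loopA_close hnotake2]
      simp only [List.nil_append, String.toList_ofList]
      congr 1
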